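-- pv_equiv track=rewrite | github.com/tfidfwastaken/yacs | yacs/analysis.py | get_pts
-- ===== SOURCE A (Python) =====
-- def get_pts(w):
--     #start = [1,3,4,7]
--     start = w[2]
--     #end = [2,5,6,8]
--     end = w[3]
--     st = []
--     en = []
--     for i in range(len(start)):
--         st.append((start[i],0))
--     for i in range(len(end)):
--         en.append((end[i],1))
--     combined = st + en
--     combined.sort()
--     c = 0
--     twc = []
--     res = []
--     for i in combined:
--         if i[1] == 0:
--             c+=1
--         else:
--             c-=1
--         twc.append((i[0],c))
--     base = combined[0][0]
--     for i in twc: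
--         x = i[0] - base
--         res.append((x,i[1]))
--     return res
-- ===== SOURCE B (Python) =====
-- def get_pts(w):
--     starts = sorted(w[2])
--     ends = sorted(w[3])
--     i = j = c = 0
--     events = []
--     while i < len(starts) or j < len(ends):
--         if i < len(starts) and (j >= len(ends) or starts[i] <= ends[j]):
--             c += 1
--             events.append((starts[i], c))
--             i += 1
--         else:
--             c -= 1
--             events.append((ends[j], c))
--             j += 1
--     base = events[0][0]
--     return [(t - base, k) for (t, k) in events]
-- ===== Notes on version B (the rewrite author's own statement) =====
-- stated objective: alternative
-- what changed: Replaces tagging all events, sorting the combined tagged list and two rebuild passes with sorting the start and end lists separately and a single two-pointer merge that emits (time, running count) directly; B raises on the same inputs A does (w shorter than 4, or both event lists empty), so no inputs A returns on are excluded.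
import Mathlib
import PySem

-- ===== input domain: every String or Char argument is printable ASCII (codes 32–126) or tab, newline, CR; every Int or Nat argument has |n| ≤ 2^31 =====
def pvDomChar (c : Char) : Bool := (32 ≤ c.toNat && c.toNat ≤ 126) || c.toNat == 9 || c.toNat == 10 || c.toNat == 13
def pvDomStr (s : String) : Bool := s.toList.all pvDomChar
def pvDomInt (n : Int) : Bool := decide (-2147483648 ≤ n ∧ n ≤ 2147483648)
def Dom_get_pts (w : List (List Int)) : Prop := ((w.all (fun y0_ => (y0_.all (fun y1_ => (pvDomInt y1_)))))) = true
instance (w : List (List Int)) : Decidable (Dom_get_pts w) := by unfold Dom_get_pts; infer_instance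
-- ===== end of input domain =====

-- B replaces tag-sort-then-scan with two separate sorts and a two-pointer merge that
-- emits (time, running count) directly: an alternative decomposition, same asymptotic cost.

-- ===== PORT A =====
def get_pts (w : List (List Int)) : List (Int × Int) :=
  let start := (PySem.List.pyGet? w 2).getD []
  let end_ := (PySem.List.pyGet? w 3).getD []
  let st := (PySem.List.pyRange 0 (PySem.List.len start)).foldl
      (fun acc i => acc ++ [(PySem.List.pyGetD start i 0, (0 : Int))]) []
  let en := (PySem.List.pyRange 0 (PySem.List.len end_)).foldl
      (fun acc i => acc ++ [(PySem.List.pyGetD end_ i 0, (1 : Int))]) []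
  let combined := PySem.List.sorted2 (st ++ en) Prod.fst Prod.snd
  let twc := (combined.foldl (fun (s : Int × List (Int × Int)) i =>
      let c := if i.2 == 0 then s.1 + 1 else s.1 - 1
      (c, s.2 ++ [(i.1, c)])) (0, [])).2
  let base := (PySem.List.pyGetD combined 0 (0, 0)).1
  twc.foldl (fun acc i => acc ++ [(i.1 - base, i.2)]) []

-- ===== PORT B =====
-- the two-pointer merge of Source B: pick the start while starts[i] <= ends[j]
def mergeCount : List Int → List Int → Int → List (Int × Int)
  | s :: ss, e :: es, c =>
      if s ≤ e then (s, c + 1) :: mergeCount ss (e :: es) (c + 1)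
      else (e, c - 1) :: mergeCount (s :: ss) es (c - 1)
  | s :: ss, [], c => (s, c + 1) :: mergeCount ss [] (c + 1)
  | [], e :: es, c => (e, c - 1) :: mergeCount [] es (c - 1)
  | [], [], _ => []

def get_pts_alt (w : List (List Int)) : List (Int × Int) :=
  let starts := PySem.List.sorted ((PySem.List.pyGet? w 2).getD []) (fun x => x)
  let ends := PySem.List.sorted ((PySem.List.pyGet? w 3).getD []) (fun x => x)
  let events := mergeCount starts ends 0
  let base := (PySem.List.pyGetD events 0 (0, 0)).1
  events.map (fun p => (p.1 - base, p.2))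

-- ===== PRECONDITION & SPEC =====
-- A raises IndexError when w has fewer than 4 elements (w[2]/w[3]) or when both event
-- lists are empty (combined[0][0]); B raises on exactly the same inputs.
def Pre_get_pts (w : List (List Int)) : Prop :=
  4 ≤ w.length ∧ (w.getD 2 [] ≠ [] ∨ w.getD 3 [] ≠ [])
instance (w : List (List Int)) : Decidable (Pre_get_pts w) := by unfold Pre_get_pts; infer_instance
def pvWitness_get_pts : List (List Int) := [[], [], [1, 3], [2, 5]]

def Spec_get_pts (w : List (List Int)) (out : List (Int × Int)) : Prop := out = get_pts_alt w
instance (w : List (List Int)) (out : List (Int × Int)) : Decidable (Spec_get_pts w out) := by unfold Spec_get_pts; infer_instance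

-- ===== CLAIM (what is proved, stated in full; the proofs are below) =====
def Claim_equal_get_pts : Prop := ∀ (w : List (List Int)), Dom_get_pts w → Pre_get_pts w → Spec_get_pts w (get_pts w)

-- ===== LEMMAS AND PROOFS =====

-- Python's lexicographic ≤ on (time, tag) pairs
def lexLe (a b : Int × Int) : Prop := a.1 < b.1 ∨ (a.1 = b.1 ∧ a.2 ≤ b.2)

lemma lexLe_total (a b : Int × Int) : lexLe a b ∨ lexLe b a := by
  unfold lexLe; omega

lemma lexLe_antisymm {a b : Int × Int} (h1 : lexLe a b) (h2 : lexLe b a) : a = b := by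
  unfold lexLe at *
  obtain ⟨x, y⟩ := a; obtain ⟨u, v⟩ := b
  simp_all; omega

lemma lexLe_trans {a b c : Int × Int} (h1 : lexLe a b) (h2 : lexLe b c) : lexLe a c := by
  unfold lexLe at *; omega

-- the Bool comparison sorted2 uses with keys fst/snd
def lt2 (a b : Int × Int) : Bool :=
  decide (a.1 < b.1) || !decide (b.1 < a.1) && decide (a.2 < b.2)

lemma lt2_false_iff (a b : Int × Int) : lt2 b a = false ↔ lexLe a b := by
  unfold lt2 lexLe; simp; omega

lemma insertBy_lt2_pairwise (x : Int × Int) (ys : List (Int × Int))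
    (h : ys.Pairwise lexLe) : (PySem.List.insertBy lt2 x ys).Pairwise lexLe := by
  induction ys with
  | nil => simp [PySem.List.insertBy]
  | cons y ys ih =>
    rw [List.pairwise_cons] at h
    obtain ⟨hy, hys⟩ := h
    simp only [PySem.List.insertBy]
    by_cases hxy : lt2 x y = true
    · have hxyle : lexLe x y := by
        rcases lexLe_total x y with h | h
        · exact h
        · rw [← lt2_false_iff] at h; simp [h] at hxy
      rw [if_pos hxy]
      refine List.Pairwise.cons ?_ (List.Pairwise.cons hy hys)
      intro z hz
      rcases List.mem_cons.mp hz with rfl | hz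
      · exact hxyle
      · exact lexLe_trans hxyle (hy z hz)
    · rw [if_neg hxy]
      have hyx : lexLe y x := by
        rw [← lt2_false_iff]; simpa using hxy
      refine List.Pairwise.cons ?_ (ih hys)
      intro z hz
      rw [PySem.List.mem_insertBy] at hz
      rcases hz with rfl | hz
      · exact hyx
      · exact hy z hz

lemma sorted2_pairwise_lex (xs : List (Int × Int)) :
    (PySem.List.sorted2 xs Prod.fst Prod.snd).Pairwise lexLe := by
  show (xs.foldl (fun acc x => PySem.List.insertBy lt2 x acc) []).Pairwise lexLe
  suffices h : ∀ acc : List (Int × Int), acc.Pairwise lexLe →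
      (xs.foldl (fun acc x => PySem.List.insertBy lt2 x acc) acc).Pairwise lexLe from
    h [] (by simp)
  induction xs with
  | nil => intro acc h; simpa using h
  | cons x xs ih =>
    intro acc h
    exact ih _ (insertBy_lt2_pairwise x acc h)

-- tagged merge: the event order Source B's two-pointer loop visits
def mergeT : List Int → List Int → List (Int × Int)
  | s :: ss, e :: es =>
      if s ≤ e then (s, 0) :: mergeT ss (e :: es) else (e, 1) :: mergeT (s :: ss) es
  | s :: ss, [] => (s, 0) :: mergeT ss []
  | [], e :: es => (e, 1) :: mergeT [] es
  | [], [] => []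

lemma mem_mergeT (ss es : List Int) (z : Int × Int) (hz : z ∈ mergeT ss es) :
    (z.2 = 0 ∧ z.1 ∈ ss) ∨ (z.2 = 1 ∧ z.1 ∈ es) := by
  induction ss, es using mergeT.induct with
  | case1 s ss e es h ih =>
    rw [mergeT, if_pos h] at hz
    rcases List.mem_cons.mp hz with rfl | hz
    · simp
    · rcases ih hz with ⟨h0, h1⟩ | ⟨h0, h1⟩ <;> simp_all
  | case2 s ss e es h ih =>
    rw [mergeT, if_neg h] at hz
    rcases List.mem_cons.mp hz with rfl | hz
    · simp
    · rcases ih hz with ⟨h0, h1⟩ | ⟨h0, h1⟩ <;> simp_all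
  | case3 s ss ih =>
    rw [mergeT] at hz
    rcases List.mem_cons.mp hz with rfl | hz
    · simp
    · rcases ih hz with ⟨h0, h1⟩ | ⟨h0, h1⟩ <;> simp_all
  | case4 e es ih =>
    rw [mergeT] at hz
    rcases List.mem_cons.mp hz with rfl | hz
    · simp
    · rcases ih hz with ⟨h0, h1⟩ | ⟨h0, h1⟩ <;> simp_all
  | case5 => simp [mergeT] at hz

lemma mergeT_perm (ss es : List Int) :
    (mergeT ss es).Perm (ss.map (·, (0 : Int)) ++ es.map (·, (1 : Int))) := by
  induction ss, es using mergeT.induct with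
  | case1 s ss e es h ih =>
    rw [mergeT, if_pos h]
    simpa using ih.cons (s, 0)
  | case2 s ss e es h ih =>
    rw [mergeT, if_neg h]
    refine ((ih.cons (e, 1)).trans ?_)
    simpa using (List.perm_middle (a := ((e : Int), (1 : Int)))
      (l₁ := (s :: ss).map (·, (0 : Int))) (l₂ := es.map (·, (1 : Int)))).symm
  | case3 s ss ih =>
    rw [mergeT]; simpa using ih.cons (s, 0)
  | case4 e es ih =>
    rw [mergeT]; simpa using ih.cons (e, 1)
  | case5 => simp [mergeT]

lemma mergeT_pairwise (ss es : List Int)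
    (hs : ss.Pairwise (· ≤ ·)) (he : es.Pairwise (· ≤ ·)) :
    (mergeT ss es).Pairwise lexLe := by
  induction ss, es using mergeT.induct with
  | case1 s ss e es h ih =>
    rw [List.pairwise_cons] at hs
    obtain ⟨hs1, hs2⟩ := hs
    rw [mergeT, if_pos h]
    refine List.Pairwise.cons ?_ (ih hs2 he)
    intro z hz
    rcases mem_mergeT _ _ _ hz with ⟨_, h1⟩ | ⟨htag, h1⟩
    · have := hs1 _ h1
      unfold lexLe; omega
    · have : e ≤ z.1 := by
        rcases List.mem_cons.mp h1 with heq | h1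
        · omega
        · exact (List.pairwise_cons.mp he).1 _ h1
      unfold lexLe; omega
  | case2 s ss e es h ih =>
    rw [List.pairwise_cons] at he
    obtain ⟨he1, he2⟩ := he
    rw [mergeT, if_neg h]
    refine List.Pairwise.cons ?_ (ih hs he2)
    intro z hz
    rcases mem_mergeT _ _ _ hz with ⟨_, h1⟩ | ⟨htag, h1⟩
    · have : s ≤ z.1 := by
        rcases List.mem_cons.mp h1 with heq | h1
        · omega
        · exact (List.pairwise_cons.mp hs).1 _ h1
      unfold lexLe; omega
    · have := he1 _ h1
      unfold lexLe; omega
  | case3 s ss ih =>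
    rw [List.pairwise_cons] at hs
    obtain ⟨hs1, hs2⟩ := hs
    rw [mergeT]
    refine List.Pairwise.cons ?_ (ih hs2 List.Pairwise.nil)
    intro z hz
    rcases mem_mergeT _ _ _ hz with ⟨_, h1⟩ | ⟨_, h1⟩
    · have := hs1 _ h1; unfold lexLe; omega
    · simp at h1
  | case4 e es ih =>
    rw [List.pairwise_cons] at he
    obtain ⟨he1, he2⟩ := he
    rw [mergeT]
    refine List.Pairwise.cons ?_ (ih List.Pairwise.nil he2)
    intro z hz
    rcases mem_mergeT _ _ _ hz with ⟨_, h1⟩ | ⟨_, h1⟩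
    · simp at h1
    · have := he1 _ h1; unfold lexLe; omega
  | case5 => simp [mergeT]

-- A's running-count scan over a tagged event list
def scanC : List (Int × Int) → Int → List (Int × Int)
  | [], _ => []
  | (t, g) :: r, c =>
      let c' := if g == 0 then c + 1 else c - 1
      (t, c') :: scanC r c'

lemma mergeCount_eq_scanC (ss es : List Int) (c : Int) :
    mergeCount ss es c = scanC (mergeT ss es) c := by
  induction ss, es using mergeT.induct generalizing c with
  | case1 s ss e es h ih => rw [mergeT, if_pos h, mergeCount, if_pos h]; simp [scanC, ih]
  | case2 s ss e es h ih => rw [mergeT, if_neg h, mergeCount, if_neg h]; simp [scanC, ih]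
  | case3 s ss ih => rw [mergeT, mergeCount]; simp [scanC, ih]
  | case4 e es ih => rw [mergeT, mergeCount]; simp [scanC, ih]
  | case5 => rw [mergeT, mergeCount]; rfl

lemma foldl_scan_eq_scanC (l : List (Int × Int)) (c : Int) (acc : List (Int × Int)) :
    (l.foldl (fun (s : Int × List (Int × Int)) i =>
      let c := if i.2 == 0 then s.1 + 1 else s.1 - 1
      (c, s.2 ++ [(i.1, c)])) (c, acc)).2 = acc ++ scanC l c := by
  induction l generalizing c acc with
  | nil => simp [scanC]
  | cons p l ih =>
    obtain ⟨t, g⟩ := p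
    simp only [List.foldl_cons, scanC, ih]
    simp

-- the central fact: the two-pointer merge of the separately sorted lists visits the
-- events in exactly the order A's tagged combined sort produces
lemma mergeT_eq_sorted2 (s0 e0 : List Int) :
    mergeT (PySem.List.sorted s0 (fun x => x)) (PySem.List.sorted e0 (fun x => x))
      = PySem.List.sorted2 (s0.map (·, (0 : Int)) ++ e0.map (·, (1 : Int))) Prod.fst Prod.snd := by
  apply List.Perm.eq_of_pairwise (le := lexLe)
  · intro a b _ _ h1 h2; exact lexLe_antisymm h1 h2
  · exact mergeT_pairwise _ _ (PySem.List.sorted_pairwise s0 (fun x => x))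
      (PySem.List.sorted_pairwise e0 (fun x => x))
  · exact sorted2_pairwise_lex _
  · refine (mergeT_perm _ _).trans (.trans ?_ (PySem.List.sorted2_perm _ _ _ _).symm)
    exact ((PySem.List.sorted_perm s0 _ false).map _).append ((PySem.List.sorted_perm e0 _ false).map _)

-- ===== VERDICT (by name: the statement is the Claim_ definition above) =====
theorem get_pts_spec : Claim_equal_get_pts := by
  intro w _ _
  show get_pts w = get_pts_alt w
  unfold get_pts get_pts_alt
  rw [PySem.List.foldl_append_singleton_eq_map, PySem.List.foldl_append_singleton_eq_map,
      PySem.List.foldl_append_singleton_eq_map]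
  simp only [List.nil_append]
  set s0 := (PySem.List.pyGet? w 2).getD [] with hs0
  set e0 := (PySem.List.pyGet? w 3).getD [] with he0
  have hst : (PySem.List.pyRange 0 (PySem.List.len s0)).map
      (fun i => (PySem.List.pyGetD s0 i 0, (0 : Int))) = s0.map (·, (0 : Int)) := by
    rw [show (fun i => (PySem.List.pyGetD s0 i 0, (0 : Int)))
        = (fun t => (t, (0 : Int))) ∘ (fun j => PySem.List.pyGetD s0 j 0) from rfl,
      ← List.map_map, PySem.List.map_pyGetD_pyRange_zero]
  have hen : (PySem.List.pyRange 0 (PySem.List.len e0)).map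
      (fun i => (PySem.List.pyGetD e0 i 0, (1 : Int))) = e0.map (·, (1 : Int)) := by
    rw [show (fun i => (PySem.List.pyGetD e0 i 0, (1 : Int)))
        = (fun t => (t, (1 : Int))) ∘ (fun j => PySem.List.pyGetD e0 j 0) from rfl,
      ← List.map_map, PySem.List.map_pyGetD_pyRange_zero]
  rw [hst, hen]
  rw [mergeCount_eq_scanC, mergeT_eq_sorted2]
  set comb := PySem.List.sorted2 (s0.map (·, (0 : Int)) ++ e0.map (·, (1 : Int))) Prod.fst Prod.snd
  rw [foldl_scan_eq_scanC]
  simp only [List.nil_append]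
  have hbase : (PySem.List.pyGetD comb 0 (0, 0)).1 = (PySem.List.pyGetD (scanC comb 0) 0 (0, 0)).1 := by
    cases h : comb with
    | nil => simp [PySem.List.pyGetD, PySem.List.pyGet?, PySem.List.pyIdx?]
    | cons p r =>
      obtain ⟨t, g⟩ := p
      simp [scanC, PySem.List.pyGetD, PySem.List.pyGet?, PySem.List.pyIdx?]
  rw [hbase]
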